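-- pv_equiv track=rewrite | github.com/YILING0013/AI_NovelGenerator | novel_generator/language_quality.py | _find_word_positions
-- ===== SOURCE A (Python) =====
-- from typing import Dict, List, Tuple, Optional, Any, Set
--
-- def _find_word_positions(text: str, word: str) -> List[int]:
--     """查找词汇在文本中的位置"""
--     positions = []
--     start = 0
--     while True:
--         pos = text.find(word, start)
--         if pos == -1:
--             break
--         positions.append(pos)
--         start = pos + 1
--     return positions
-- ===== SOURCE B (Python) =====
-- def _find_word_positions(text, word):
--     """Per-candidate-index scan: check every position directly instead of find-and-advance."""
--     n = len(text) - len(word) + 1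
--     return [i for i in range(n) if text[i:i+len(word)] == word]
-- ===== Notes on version B (the rewrite author's own statement) =====
-- stated objective: alternative
-- what changed: Replaced the while-loop around str.find (jump to each next match and restart the search one past it) with a single comprehension over all candidate indices range(len(text)-len(word)+1), testing each slice text[i:i+len(word)] == word directly.
import Mathlib
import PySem

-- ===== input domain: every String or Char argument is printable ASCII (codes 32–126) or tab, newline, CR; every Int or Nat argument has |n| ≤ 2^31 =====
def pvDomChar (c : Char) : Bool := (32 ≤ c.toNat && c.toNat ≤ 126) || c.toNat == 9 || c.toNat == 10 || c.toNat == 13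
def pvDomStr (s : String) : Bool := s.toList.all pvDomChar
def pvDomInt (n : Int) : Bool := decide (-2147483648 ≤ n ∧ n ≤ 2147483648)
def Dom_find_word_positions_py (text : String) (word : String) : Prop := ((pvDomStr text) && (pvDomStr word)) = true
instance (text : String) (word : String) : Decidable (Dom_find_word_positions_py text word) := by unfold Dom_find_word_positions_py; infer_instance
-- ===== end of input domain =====

-- B replaces A's find-and-advance while-loop by a direct scan over every candidate
-- index, testing the slice at each; alternative traversal, same results.

-- ===== PORT A =====
-- the while-loop: pos = text.find(word, start); stop on -1, else record pos, start = pos + 1.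
-- fuel (text.length + 2) only makes the recursion total; it is proved sufficient below.
def pvLoopA (s w : List Char) : Nat → Nat → List Int
  | 0, _ => []
  | fuel + 1, start =>
    let pos := PySem.Chars.findFrom s w (start : Int) none
    if pos = -1 then [] else pos :: pvLoopA s w fuel (pos.toNat + 1)

def find_word_positions_py (text : String) (word : String) : List Int :=
  pvLoopA text.toList word.toList (text.toList.length + 2) 0

-- ===== PORT B =====
-- [i for i in range(len(text) - len(word) + 1) if text[i:i+len(word)] == word]
def find_word_positions_py_alt (text : String) (word : String) : List Int :=
  (PySem.List.pyRange 0 ((text.toList.length : Int) - (word.toList.length : Int) + 1) 1).filter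
    (fun i => PySem.List.slice text.toList (some i) (some (i + (word.toList.length : Int))) == word.toList)

-- ===== PRECONDITION & SPEC =====
def Spec_find_word_positions_py (text : String) (word : String) (out : List Int) : Prop := out = find_word_positions_py_alt text word
instance (text : String) (word : String) (out : List Int) : Decidable (Spec_find_word_positions_py text word out) := by unfold Spec_find_word_positions_py; infer_instance

-- ===== CLAIM (what is proved, stated in full; the proofs are below) =====
def Claim_equal_find_word_positions_py : Prop := ∀ (text : String) (word : String), Dom_find_word_positions_py text word → Spec_find_word_positions_py text word (find_word_positions_py text word)

-- ===== LEMMAS AND PROOFS =====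

-- B's test at an index i ≥ 0 is exactly "w is a prefix of s dropped at i".
lemma pv_pred_iff (s w : List Char) (i : Int) (hi : 0 ≤ i) :
    ((PySem.List.slice s (some i) (some (i + (w.length : Int))) == w) = true) ↔ w <+: s.drop i.toNat := by
  rw [PySem.List.slice_toNat s hi (by omega)]
  have h : (i + (w.length : Int)).toNat - i.toNat = w.length := by omega
  rw [h, beq_iff_eq]
  constructor
  · intro he
    exact he ▸ List.take_prefix w.length (s.drop i.toNat)
  · intro hp
    exact (List.prefix_iff_eq_take.mp hp).symm

-- a prefix occurrence at j ≤ |s| lies inside B's range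
lemma pv_lt_n (s w : List Char) (j : Nat) (hj : j ≤ s.length) (hp : w <+: s.drop j) :
    (j : Int) < (s.length : Int) - (w.length : Int) + 1 := by
  have := hp.length_le
  simp only [List.length_drop] at this
  omega

-- findFrom returns -1 for a start past the end of the string
lemma pv_findFrom_past (s w : List Char) (k : Nat) (hk : s.length < k) :
    PySem.Chars.findFrom s w (k : Int) none = -1 := by
  simp only [PySem.Chars.findFrom]
  have h1 : ¬ ((k : Int) < 0) := by omega
  rw [if_neg h1, if_pos (by exact_mod_cast hk)]

-- main loop invariant: with enough fuel, A's loop from `start` produces exactly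
-- B's filtered range restricted to [start, n)
lemma pv_loop_eq (s w : List Char) (fuel start : Nat)
    (hs : start ≤ s.length + 1) (hf : s.length + 2 - start ≤ fuel) :
    pvLoopA s w fuel start =
      (PySem.List.pyRange (start : Int) ((s.length : Int) - (w.length : Int) + 1) 1).filter
        (fun i => PySem.List.slice s (some i) (some (i + (w.length : Int))) == w) := by
  induction fuel generalizing start with
  | zero => omega
  | succ fuel ih =>
    by_cases hpast : s.length < start
    · -- start = |s| + 1 : findFrom is -1 and the range is empty
      have hstep : pvLoopA s w (fuel + 1) start = [] := by
        simp [pvLoopA, pv_findFrom_past s w start hpast]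
      rw [hstep, PySem.List.pyRange_one_eq_nil (by omega)]
      rfl
    · rw [Nat.not_lt] at hpast
      by_cases hneg : PySem.Chars.findFrom s w (start : Int) none = -1
      · -- no occurrence at or after start
        have hnot := (PySem.Chars.findFrom_natCast_eq_neg_one_iff s w start hpast).mp hneg
        have hstep : pvLoopA s w (fuel + 1) start = [] := by
          simp [pvLoopA, hneg]
        rw [hstep]
        symm
        rw [List.filter_eq_nil_iff]
        intro i hi hp
        have hmem := (PySem.List.mem_pyRange_one).mp hi
        have hi0 : 0 ≤ i := le_trans (by omega) hmem.1
        have hpre := (pv_pred_iff s w i hi0).mp hp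
        apply hnot
        refine List.infix_iff_prefix_suffix.mpr ⟨s.drop i.toNat, hpre, ?_⟩
        have hdd : s.drop i.toNat = (s.drop start).drop (i.toNat - start) := by
          rw [List.drop_drop]; congr 1; omega
        rw [hdd]
        exact List.drop_suffix _ _
      · -- occurrence at pos = findFrom …
        obtain ⟨hge, hpre, hmin⟩ := PySem.Chars.findFrom_natCast_spec s w start hpast hneg
        obtain ⟨p, hposp⟩ : ∃ p : Nat, PySem.Chars.findFrom s w (start : Int) none = (p : Int) :=
          ⟨(PySem.Chars.findFrom s w (start : Int) none).toNat, by omega⟩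
        rw [hposp] at hge hpre hmin
        simp only [Int.toNat_natCast] at hpre hmin
        have hsp : start ≤ p := by exact_mod_cast hge
        -- p ≤ |s|
        have hple : p ≤ s.length := by
          by_cases hw : w = []
          · subst hw
            by_contra h
            rw [Nat.not_le] at h
            exact hmin start le_rfl (by omega) (List.nil_prefix)
          · have hlen := hpre.length_le
            simp only [List.length_drop] at hlen
            have hwpos : 0 < w.length := List.length_pos_iff.mpr hw
            omega
        have hpn : (p : Int) < (s.length : Int) - (w.length : Int) + 1 :=
          pv_lt_n s w p hple hpre
        -- one step of the loop
        have hstep : pvLoopA s w (fuel + 1) start = (p : Int) :: pvLoopA s w fuel (p + 1) := by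
          simp only [pvLoopA, hposp, Int.toNat_natCast]
          rw [if_neg (by omega)]
        rw [hstep]
        -- split B's range at p and p + 1
        rw [PySem.List.pyRange_one_append (start : Int) (p : Int)
              ((s.length : Int) - (w.length : Int) + 1) (by omega) (by omega),
            PySem.List.pyRange_one_cons hpn, List.filter_append]
        have hfirst : (PySem.List.pyRange (start : Int) (p : Int) 1).filter
            (fun i => PySem.List.slice s (some i) (some (i + (w.length : Int))) == w) = [] := by
          rw [List.filter_eq_nil_iff]
          intro i hi hp'
          have hmem := (PySem.List.mem_pyRange_one).mp hi
          have hi0 : 0 ≤ i := le_trans (by omega) hmem.1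
          exact hmin i.toNat (by omega) (by omega) ((pv_pred_iff s w i hi0).mp hp')
        rw [hfirst, List.nil_append, List.filter_cons,
            if_pos ((pv_pred_iff s w (p : Int) (by omega)).mpr hpre)]
        rw [ih (p + 1) (by omega) (by omega)]
        norm_num

-- ===== VERDICT (by name: the statement is the Claim_ definition above) =====
theorem find_word_positions_py_spec : Claim_equal_find_word_positions_py := by
  intro text word _
  unfold Spec_find_word_positions_py find_word_positions_py find_word_positions_py_alt
  rw [pv_loop_eq text.toList word.toList (text.toList.length + 2) 0 (by omega) (by omega)]
  norm_num
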